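-- pv_equiv track=rewrite | github.com/sundevilmotorsports/processing | SDM26/SDM26_gui_benji2_to_csv.py | filter_duplicate_headers
-- ===== SOURCE A (Python) =====
-- def filter_duplicate_headers(header_str):
--     """
--     Filter CSV header string and count occurrences of each base name
--
--     Args:
--         header_str: String containing comma-separated header names
--
--     Returns:
--         Tuple containing:
--             - Filtered header string with duplicates removed
--             - List of integers representing count of each base name
--
--     Example:
--         Input: "TS,TS1,TS2,TS3"
--         Output: ("TS", [4])
--     """
--     # Split headers and remove extra whitespace
--     headers = [h.strip() for h in header_str.split(',')]
--     base_counts = {}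
--     filtered = []
--
--     for header in headers:
--         header = header.strip('\x00')
--         base = header.rstrip('0123456789')
--         base = base.strip()
--         if base not in base_counts:
--             filtered.append(base)
--             base_counts[base] = 1
--         else:
--             base_counts[base] += 1
--
--     counts = [base_counts[base] for base in filtered]
--
--     return ','.join(filtered), counts
-- ===== SOURCE B (Python) =====
-- def filter_duplicate_headers(header_str):
--     def clean(h):
--         return h.strip().strip('\x00').rstrip('0123456789').strip()
--
--     def go(bases):
--         # head-partition recursion: take the first base, count & remove all of
--         # its occurrences, recurse on what is left (no dict, no counting pass)
--         if not bases:
--             return [], []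
--         b, tail = bases[0], bases[1:]
--         rest = [x for x in tail if x != b]
--         names, counts = go(rest)
--         return [b] + names, [1 + len(tail) - len(rest)] + counts
--
--     names, counts = go([clean(h) for h in header_str.split(',')])
--     return ','.join(names), counts
-- ===== Notes on version B (the rewrite author's own statement) =====
-- stated objective: alternative
-- what changed: Replaces A's single stateful loop (dict of counts plus an incrementally grown order list) with a head-partition recursion: clean all headers in one pass, then repeatedly take the first base name, remove all of its occurrences from the remainder and derive its count from the length drop, recursing on what is left — no dictionary and no counting pass.
import Mathlib
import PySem

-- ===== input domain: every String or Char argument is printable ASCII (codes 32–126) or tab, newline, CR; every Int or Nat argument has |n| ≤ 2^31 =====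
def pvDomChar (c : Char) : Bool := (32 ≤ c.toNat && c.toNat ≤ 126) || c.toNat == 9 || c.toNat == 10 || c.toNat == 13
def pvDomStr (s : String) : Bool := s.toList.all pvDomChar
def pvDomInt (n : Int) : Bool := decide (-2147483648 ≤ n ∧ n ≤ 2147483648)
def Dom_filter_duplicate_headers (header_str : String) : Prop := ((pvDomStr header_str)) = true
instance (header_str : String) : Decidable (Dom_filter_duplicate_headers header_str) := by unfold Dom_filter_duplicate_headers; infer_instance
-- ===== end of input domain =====

-- B replaces A's single stateful loop (dict of counts + grown order list) by a
-- head-partition recursion: take the first base, remove and count all of its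
-- occurrences, recurse on the remainder; objective: alternative algorithm.

-- shared builtin: Python's s.rstrip(chars) (both programs call s.rstrip('0123456789')); exact for any chars
def pvRstripChars (cs chars : List Char) : List Char :=
  (cs.reverse.dropWhile (fun c => chars.contains c)).reverse

-- ===== PORT A =====
def filter_duplicate_headers (header_str : String) : String × List Int :=
  let headers := (PySem.Chars.splitOn header_str.toList ",".toList).map (fun h => PySem.Str.strip (String.mk h))
  let st := headers.foldl
    (fun (st : PySem.Dict String Int × List String) header =>
      let header := PySem.Str.stripChars header "\x00"
      let base := String.mk (pvRstripChars header.toList "0123456789".toList)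
      let base := PySem.Str.strip base
      if st.1.contains base then (st.1.modify base 0 (· + 1), st.2)
      else (st.1.insert base 1, st.2 ++ [base]))
    (PySem.Dict.empty, [])
  let counts := st.2.map (fun base => st.1.getD base 0)
  (PySem.Str.join "," st.2, counts)

-- ===== PORT B =====
-- B's helper clean(h)
def pvClean (h : List Char) : String :=
  PySem.Str.strip (String.mk (pvRstripChars
    (PySem.Str.stripChars (PySem.Str.strip (String.mk h)) "\x00").toList "0123456789".toList))

-- B's helper go(bases): head-partition recursion
def pvGo : List String → List String × List Int
  | [] => ([], [])
  | b :: tail =>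
    let rest := tail.filter (fun x => x ≠ b)
    let p := pvGo rest
    (b :: p.1, (1 + (tail.length : Int) - (rest.length : Int)) :: p.2)
termination_by l => l.length
decreasing_by
  simp only [List.length_cons, List.length_unattach]
  exact Nat.lt_succ_of_le (le_trans (List.length_filter_le _ _) (le_of_eq List.length_attach))

def filter_duplicate_headers_alt (header_str : String) : String × List Int :=
  let bases := (PySem.Chars.splitOn header_str.toList ",".toList).map pvClean
  let p := pvGo bases
  (PySem.Str.join "," p.1, p.2)

-- ===== PRECONDITION & SPEC =====
def Spec_filter_duplicate_headers (header_str : String) (out : String × List Int) : Prop := out = filter_duplicate_headers_alt header_str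
instance (header_str : String) (out : String × List Int) : Decidable (Spec_filter_duplicate_headers header_str out) := by unfold Spec_filter_duplicate_headers; infer_instance

-- ===== CLAIM =====
def Claim_equal_filter_duplicate_headers : Prop := ∀ (header_str : String), Dom_filter_duplicate_headers header_str → Spec_filter_duplicate_headers header_str (filter_duplicate_headers header_str)

-- ===== LEMMAS AND PROOFS =====

-- the body of A's loop, on an already-cleaned base name
def pvStep (st : PySem.Dict String Int × List String) (base : String) :
    PySem.Dict String Int × List String :=
  if st.1.contains base then (st.1.modify base 0 (· + 1), st.2)
  else (st.1.insert base 1, st.2 ++ [base])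

lemma pv_getD_of_not_contains (d : PySem.Dict String Int) (k : String) (v : Int)
    (h : d.contains k = false) : d.getD k v = v := by
  simp [PySem.Dict.getD, (PySem.Dict.get?_eq_none_iff_contains d k).2 h]

lemma pv_fold_inv (l : List String) (d : PySem.Dict String Int) (f : List String)
    (h : ∀ x, d.contains x = PySem.Set.contains f x) :
    (l.foldl pvStep (d, f)).2 = PySem.Set.update f l ∧
      ∀ b, (l.foldl pvStep (d, f)).1.getD b 0 = d.getD b 0 + l.count b := by
  induction l generalizing d f with
  | nil => exact ⟨rfl, fun b => by simp⟩
  | cons a l ih =>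
    simp only [List.foldl_cons, List.count_cons]
    by_cases hc : d.contains a = true
    · have hm : a ∈ f := by
        have := (h a).symm.trans hc
        simpa [PySem.Set.contains] using this
      have hstep : pvStep (d, f) a = (d.modify a 0 (· + 1), f) := by
        simp [pvStep, hc]
      have hadd : PySem.Set.add f a = f := by simp [PySem.Set.add, PySem.Set.contains, hm]
      have h' : ∀ x, (d.modify a 0 (· + 1)).contains x = PySem.Set.contains f x := by
        intro x
        rw [PySem.Dict.contains_modify, h x]
        by_cases hx : x = a
        · subst hx; simp [PySem.Set.contains, hm]
        · simp [hx]
      obtain ⟨h1, h2⟩ := ih (d.modify a 0 (· + 1)) f h'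
      rw [hstep]
      refine ⟨by rw [h1]; simp [PySem.Set.update, hadd], fun b => ?_⟩
      rw [h2 b, PySem.Dict.getD_modify]
      by_cases hb : b = a
      · subst hb
        simp
        ring
      · simp [hb]
        exact fun hab => hb hab.symm
    · have hc' : d.contains a = false := by simpa using hc
      have hm : a ∉ f := by
        have := (h a).symm.trans hc'
        simpa [PySem.Set.contains] using this
      have hstep : pvStep (d, f) a = (d.insert a 1, f ++ [a]) := by
        simp [pvStep, hc']
      have hadd : PySem.Set.add f a = f ++ [a] := by
        simp [PySem.Set.add, PySem.Set.contains, hm]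
      have h' : ∀ x, (d.insert a 1).contains x = PySem.Set.contains (f ++ [a]) x := by
        intro x
        rw [PySem.Dict.contains_insert, h x]
        by_cases hx : x = a
        · subst hx; simp [PySem.Set.contains]
        · simp [PySem.Set.contains, hx]
      obtain ⟨h1, h2⟩ := ih (d.insert a 1) (f ++ [a]) h'
      rw [hstep]
      refine ⟨by rw [h1]; simp [PySem.Set.update, hadd], fun b => ?_⟩
      rw [h2 b, PySem.Dict.getD_insert]
      by_cases hb : b = a
      · subst hb
        rw [pv_getD_of_not_contains d b 0 hc']
        simp
        ring
      · simp [hb]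
        exact fun hab => hb hab.symm

-- Set.update past a leading seen element b, for lists avoiding b
lemma pv_update_cons_of_not_mem (b : String) (l : List String) :
    ∀ s : List String, b ∉ l → PySem.Set.update (b :: s) l = b :: PySem.Set.update s l := by
  induction l with
  | nil => intro s _; rfl
  | cons a l ih =>
    intro s hb
    have hab : a ≠ b := fun h => hb (h ▸ List.mem_cons_self)
    have hadd : PySem.Set.add (b :: s) a = b :: PySem.Set.add s a := by
      by_cases hm : a ∈ s <;>
        simp [PySem.Set.add, PySem.Set.contains, hm, hab]
    rw [PySem.Set.update_cons, PySem.Set.update_cons, hadd,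
      ih _ (fun h => hb (List.mem_cons_of_mem _ h))]

-- filtering out an element already seen does not change Set.update
lemma pv_update_filter (b : String) (l : List String) :
    ∀ s : List String, b ∈ s → PySem.Set.update s l = PySem.Set.update s (l.filter (fun x => x ≠ b)) := by
  induction l with
  | nil => intro s _; rfl
  | cons a l ih =>
    intro s hb
    by_cases hab : a = b
    · subst hab
      have hf : (a :: l).filter (fun x => x ≠ a) = l.filter (fun x => x ≠ a) := by simp
      have hadd : PySem.Set.add s a = s := by
        simp [PySem.Set.add, PySem.Set.contains, hb]
      rw [hf, PySem.Set.update_cons, hadd]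
      exact ih s hb
    · have hf : (a :: l).filter (fun x => x ≠ b) = a :: l.filter (fun x => x ≠ b) := by
        simp [hab]
      have hb' : b ∈ PySem.Set.add s a := by
        by_cases hm : a ∈ s <;> simp [PySem.Set.add, PySem.Set.contains, hm, hb]
      rw [hf, PySem.Set.update_cons, PySem.Set.update_cons]
      exact ih _ hb'

lemma pv_dedup_cons (b : String) (tail : List String) :
    PySem.List.dedup (b :: tail) = b :: PySem.List.dedup (tail.filter (fun x => x ≠ b)) := by
  have h0 : PySem.List.dedup (b :: tail) = PySem.Set.update (b :: []) tail := by
    simp [PySem.List.dedup_eq_ofList, PySem.Set.ofList_eq_foldl, PySem.Set.update,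
      PySem.Set.add, PySem.Set.contains]
  rw [h0, pv_update_filter b tail (b :: []) (by simp),
    pv_update_cons_of_not_mem b _ [] (by simp)]
  simp [PySem.List.dedup_eq_ofList, PySem.Set.ofList_eq_foldl, PySem.Set.update]

-- characterization of B's recursion: ordered dedup plus per-base counts
lemma pvGo_eq_aux : ∀ (n : Nat) (l : List String), l.length ≤ n →
    pvGo l = (PySem.List.dedup l, (PySem.List.dedup l).map (fun b => ((l.count b : Nat) : Int))) := by
  intro n
  induction n with
  | zero =>
    intro l hl
    have : l = [] := List.length_eq_zero_iff.mp (Nat.le_zero.mp hl)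
    subst this
    simp [pvGo, PySem.List.dedup_eq_ofList, PySem.Set.ofList_eq_foldl]
  | succ n ih =>
    intro l hl
    match l with
    | [] => simp [pvGo, PySem.List.dedup_eq_ofList, PySem.Set.ofList_eq_foldl]
    | b :: tail =>
      rw [pvGo]
      have hrest : (tail.filter (fun x => x ≠ b)).length ≤ n :=
        le_trans (List.length_filter_le _ _) (by simpa using hl)
      simp only [ih _ hrest, pv_dedup_cons b tail, List.map_cons]
      refine Prod.ext rfl (congrArg₂ _ ?_ (List.map_congr_left ?_))
      · -- head count: 1 + |tail| - |filtered tail| = count of b in b::tail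
        have hlen : ∀ t : List String,
            (t.filter (fun x => x ≠ b)).length + t.count b = t.length := by
          intro t
          induction t with
          | nil => simp
          | cons a t iht =>
            rw [List.filter_cons, List.count_cons]
            by_cases hab : a = b
            · subst hab
              rw [if_neg (by simp), if_pos (by simp)]
              simp only [List.length_cons]
              omega
            · rw [if_pos (by simp [hab]), if_neg (by simp [hab])]
              simp only [List.length_cons]
              omega
        have hcount : (b :: tail).count b = tail.count b + 1 := by
          simp
        have := hlen tail
        rw [hcount]
        push_cast
        omega
      · intro x hx
        have hxr : x ∈ tail.filter (fun x => x ≠ b) := (PySem.List.mem_dedup _ _).mp hx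
        have hxb : x ≠ b := by simpa using (List.of_mem_filter hxr)
        have h1 : (b :: tail).count x = tail.count x := by
          simp [Ne.symm hxb]
        have h2 : (tail.filter (fun x => x ≠ b)).count x = tail.count x :=
          List.count_filter (by simp [hxb])
        rw [h1, ← h2]

lemma pvGo_eq (l : List String) :
    pvGo l = (PySem.List.dedup l, (PySem.List.dedup l).map (fun b => ((l.count b : Nat) : Int))) :=
  pvGo_eq_aux l.length l le_rfl

-- ===== VERDICT =====
theorem filter_duplicate_headers_spec : Claim_equal_filter_duplicate_headers := by
  intro s _
  unfold Spec_filter_duplicate_headers filter_duplicate_headers filter_duplicate_headers_alt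
  obtain ⟨h1, h2⟩ := pv_fold_inv
    ((PySem.Chars.splitOn s.toList ",".toList).map pvClean)
    PySem.Dict.empty []
    (by intro x; simp [PySem.Set.contains, PySem.Dict.contains, PySem.Dict.empty])
  rw [List.foldl_map] at h1 h2
  have hfg : (fun (st : PySem.Dict String Int × List String) (h : List Char) =>
      (fun st header =>
        let header := PySem.Str.stripChars header "\x00"
        let base := String.mk (pvRstripChars header.toList "0123456789".toList)
        let base := PySem.Str.strip base
        if PySem.Dict.contains st.1 base then (st.1.modify base 0 (· + 1), st.2)
        else (st.1.insert base 1, st.2 ++ [base]))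
        st (PySem.Str.strip (String.mk h)))
      = (fun (st : PySem.Dict String Int × List String) (h : List Char) =>
        pvStep st (pvClean h)) := rfl
  simp only [List.foldl_map, hfg]
  rw [pvGo_eq]
  rw [h1]
  have hded : PySem.Set.update [] ((PySem.Chars.splitOn s.toList ",".toList).map pvClean)
      = PySem.List.dedup ((PySem.Chars.splitOn s.toList ",".toList).map pvClean) := by
    simp [PySem.List.dedup_eq_ofList, PySem.Set.ofList_eq_foldl, PySem.Set.update]
  rw [hded]
  refine Prod.ext rfl ?_
  simp only [List.map_inj_left]
  intro b hb
  rw [h2 b]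
  simp [PySem.Dict.empty, PySem.Dict.getD, PySem.Dict.get?]
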